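-- pv_equiv track=rewrite | github.com/alfredr/parajudica | inference/src/inference/jena_compiler.py | parse_triple
-- ===== SOURCE A (Python) =====
-- def parse_triple(triple_str: str) -> tuple[str, str, str]:
--     """Parse a Jena triple pattern like (?s rdf:type ?o)"""
--     triple_str = triple_str.strip()
--     if triple_str.startswith("(") and triple_str.endswith(")"):
--         triple_str = triple_str[1:-1]
--
--     # Handle quoted strings with spaces
--     parts: list[str] = []
--     current: list[str] = []
--     in_quotes: bool = False
--     quote_char = None
--
--     for char in triple_str:
--         if char in ('"', "'") and not in_quotes:
--             in_quotes = True
--             quote_char = char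
--             current.append(char)
--             continue
--
--         if char == quote_char and in_quotes:
--             in_quotes = False
--             quote_char = None
--             current.append(char)
--             continue
--
--         if char.isspace() and not in_quotes:
--             if current:
--                 parts.append("".join(current))
--                 current = []
--             continue
--
--         current.append(char)
--
--     if current:
--         parts.append("".join(current))
--
--     if len(parts) != 3:
--         raise ValueError(f"Invalid triple pattern: {triple_str}")
--
--     s, p, o = parts
--     return (s, p, o)
-- ===== SOURCE B (Python) =====
-- def parse_triple(triple_str: str) -> tuple[str, str, str]:
--     """Parse a Jena triple pattern like (?s rdf:type ?o)"""
--     s = triple_str.strip()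
--     if s.startswith("(") and s.endswith(")"):
--         s = s[1:-1]
--     n = len(s)
--     parts: list[str] = []
--     i = 0
--     while i < n:
--         if s[i].isspace():
--             i += 1
--             continue
--         # scan one token: maximal run of non-space chars, where a quote
--         # jumps to its matching closer (or end of string if unterminated)
--         j = i
--         while j < n:
--             c = s[j]
--             if c == '"' or c == "'":
--                 j += 1
--                 while j < n and s[j] != c:
--                     j += 1
--                 if j < n:
--                     j += 1
--             elif c.isspace():
--                 break
--             else:
--                 j += 1
--         parts.append(s[i:j])
--         i = j
--     if len(parts) != 3:
--         raise ValueError(f"Invalid triple pattern: {s}")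
--     return (parts[0], parts[1], parts[2])
-- ===== Notes on version B (the rewrite author's own statement) =====
-- stated objective: alternative
-- what changed: Replaces A's single-pass character state machine (parts/current/in_quotes/quote_char accumulator flags) with an index-based two-level scanner: an outer loop skips whitespace and an inner scan finds each token's end index by jumping over quoted runs, slicing tokens straight out of the string.
import Mathlib
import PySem

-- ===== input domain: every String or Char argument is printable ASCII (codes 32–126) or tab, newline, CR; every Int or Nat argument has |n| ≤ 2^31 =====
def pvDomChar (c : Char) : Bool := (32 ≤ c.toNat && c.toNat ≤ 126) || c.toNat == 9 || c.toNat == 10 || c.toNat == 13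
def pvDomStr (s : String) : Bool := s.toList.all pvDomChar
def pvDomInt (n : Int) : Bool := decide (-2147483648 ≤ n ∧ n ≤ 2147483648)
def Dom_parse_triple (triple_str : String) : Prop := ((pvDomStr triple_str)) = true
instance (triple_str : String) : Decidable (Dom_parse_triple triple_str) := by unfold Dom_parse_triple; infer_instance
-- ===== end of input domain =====

-- B replaces A's single-pass state machine (parts/current/in_quotes/quote_char flags)
-- by an index-based two-level scanner: an outer loop that skips whitespace and an inner
-- scan that finds each token's end index, jumping over quoted runs; objective: alternative
-- (same O(n) cost, different structure). Return-value equivalence only; neither mutates.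

-- ===== PORT A =====
-- the body of A's `for char in triple_str` loop, state = (parts, current, in_quotes, quote_char)
def stepA : (List String × List Char × Bool × Option Char) → Char →
    (List String × List Char × Bool × Option Char)
  | (parts, current, in_quotes, quote_char), c =>
    if (c == '"' || c == '\'') && !in_quotes then
      (parts, current ++ [c], true, some c)
    else if quote_char == some c && in_quotes then
      (parts, current ++ [c], false, none)
    else if PySem.Chars.isspace c && !in_quotes then
      if current = [] then (parts, current, in_quotes, quote_char)
      else (parts ++ [String.ofList current], [], in_quotes, quote_char)
    else (parts, current ++ [c], in_quotes, quote_char)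

def parse_triple (triple_str : String) : String × String × String :=
  let t1 := PySem.Str.strip triple_str
  let t2 := if PySem.Str.startswith t1 "(" && PySem.Str.endswith t1 ")" then
      PySem.Str.slice t1 (some 1) (some (-1)) else t1
  let st := t2.toList.foldl stepA (([], [], false, none) :
      List String × List Char × Bool × Option Char)
  let parts := if st.2.1 = [] then st.1 else st.1 ++ [String.ofList st.2.1]
  match parts with
  | [s, p, o] => (s, p, o)
  | _ => ("", "", "")   -- Python raises ValueError here; excluded by Pre_

-- ===== PORT B =====
-- B's while-loops are index loops; each is ported with a structural fuel counter that
-- merely makes the recursion total (fuel ≥ remaining indices, so it never runs out).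
-- inner `while j < n and s[j] != c: j += 1` followed by `if j < n: j += 1`
def scanQuote (cs : List Char) (q : Char) : Nat → Nat → Nat
  | 0, j => j
  | fuel + 1, j =>
    if j < cs.length then
      if cs.getD j ' ' == q then j + 1 else scanQuote cs q fuel (j + 1)
    else j

-- the `while j < n:` token scan of B (c = s[j])
def scanTok (cs : List Char) : Nat → Nat → Nat
  | 0, j => j
  | fuel + 1, j =>
    if j < cs.length then
      if cs.getD j ' ' == '"' || cs.getD j ' ' == '\'' then
        scanTok cs fuel (scanQuote cs (cs.getD j ' ') (cs.length + 1) (j + 1))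
      else if PySem.Chars.isspace (cs.getD j ' ') then j
      else scanTok cs fuel (j + 1)
    else j

-- the outer `while i < n:` loop of B
def loopB (cs : List Char) : Nat → Nat → List String → List String
  | 0, _, parts => parts
  | fuel + 1, i, parts =>
    if i < cs.length then
      if PySem.Chars.isspace (cs.getD i ' ') then loopB cs fuel (i + 1) parts
      else
        let j := scanTok cs (cs.length + 1) i
        loopB cs fuel j
          (parts ++ [String.ofList (PySem.List.slice cs (some (i : Int)) (some (j : Int)))])
    else parts

def parse_triple_alt (triple_str : String) : String × String × String :=
  let t1 := PySem.Str.strip triple_str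
  let t2 := if PySem.Str.startswith t1 "(" && PySem.Str.endswith t1 ")" then
      PySem.Str.slice t1 (some 1) (some (-1)) else t1
  let parts := loopB t2.toList (t2.toList.length + 1) 0 []
  if parts.length == 3 then (parts.getD 0 "", parts.getD 1 "", parts.getD 2 "")
  else ("", "", "")   -- Python raises ValueError here; excluded by Pre_

-- ===== PRECONDITION & SPEC =====
-- the stripped, paren-stripped character list both programs tokenize
def pvCore (triple_str : String) : List Char :=
  (let t1 := PySem.Str.strip triple_str
   if PySem.Str.startswith t1 "(" && PySem.Str.endswith t1 ")" then
     PySem.Str.slice t1 (some 1) (some (-1)) else t1).toList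

-- one step of a token-counting automaton: state (inTok, open quote, tokens started)
def countStep : (Bool × Option Char × Nat) → Char → (Bool × Option Char × Nat)
  | (inTok, some qc, cnt), c => if c == qc then (inTok, none, cnt) else (inTok, some qc, cnt)
  | (inTok, none, cnt), c =>
    if c == '"' || c == '\'' then (true, some c, if inTok then cnt else cnt + 1)
    else if PySem.Chars.isspace c then (false, none, cnt)
    else (true, none, if inTok then cnt else cnt + 1)

-- A raises ValueError unless the quote-aware tokenization yields exactly 3 tokens
def Pre_parse_triple (triple_str : String) : Prop :=
  ((pvCore triple_str).foldl countStep (false, none, 0)).2.2 = 3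
instance (triple_str : String) : Decidable (Pre_parse_triple triple_str) := by
  unfold Pre_parse_triple; infer_instance

def pvWitness_parse_triple : String := "(?s rdf:type ?o)"

def Spec_parse_triple (triple_str : String) (out : String × String × String) : Prop :=
  out = parse_triple_alt triple_str
instance (triple_str : String) (out : String × String × String) :
    Decidable (Spec_parse_triple triple_str out) := by unfold Spec_parse_triple; infer_instance

-- ===== CLAIM (what is proved, stated in full; the proofs are below) =====
def Claim_equal_parse_triple : Prop := ∀ (triple_str : String), Dom_parse_triple triple_str →
  Pre_parse_triple triple_str → Spec_parse_triple triple_str (parse_triple triple_str)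

-- ===== LEMMAS AND PROOFS =====
-- Reference tokenizer used only to STATE the precondition: a quoted run up to (and
-- including) its closing quote, or to the end of the string if unterminated
def qSpan (q : Char) : List Char → List Char × List Char
  | [] => ([], [])
  | c :: cs => if c == q then ([c], cs) else
      let p := qSpan q cs
      (c :: p.1, p.2)

theorem qSpan_append (q : Char) : ∀ cs : List Char, (qSpan q cs).1 ++ (qSpan q cs).2 = cs
  | [] => rfl
  | c :: cs => by
    unfold qSpan
    split
    · simp
    · simpa using qSpan_append q cs

theorem qSpan_rest_le (q : Char) (cs : List Char) : (qSpan q cs).2.length ≤ cs.length := by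
  have h := congrArg List.length (qSpan_append q cs)
  simp only [List.length_append] at h
  omega

-- one maximal token starting at the head (empty if the head is whitespace)
def tokSpan : List Char → List Char × List Char
  | [] => ([], [])
  | c :: cs =>
    if c == '"' || c == '\'' then
      let p := qSpan c cs
      let t := tokSpan p.2
      (c :: (p.1 ++ t.1), t.2)
    else if PySem.Chars.isspace c then ([], c :: cs)
    else
      let t := tokSpan cs
      (c :: t.1, t.2)
termination_by cs => cs.length
decreasing_by
  · have := qSpan_rest_le c cs; simp only [List.length_cons]; omega
  · simp only [List.length_cons]; omega

theorem tokSpan_append : ∀ cs : List Char, (tokSpan cs).1 ++ (tokSpan cs).2 = cs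
  | [] => by simp [tokSpan]
  | c :: cs => by
    unfold tokSpan
    split
    · have h1 := qSpan_append c cs
      have h2 := tokSpan_append (qSpan c cs).2
      simp only [List.cons_append, List.append_assoc]
      rw [h2, h1]
    · split
      · simp
      · simpa using tokSpan_append cs
termination_by cs => cs.length
decreasing_by
  all_goals simp only [List.length_cons]
  all_goals first
    | omega
    | exact Nat.lt_succ_of_le (qSpan_rest_le _ _)

theorem tokSpan_rest_le (cs : List Char) : (tokSpan cs).2.length ≤ cs.length := by
  have h := congrArg List.length (tokSpan_append cs)
  simp only [List.length_append] at h
  omega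

theorem tokSpan_cons_rest_le (c : Char) (cs : List Char)
    (hs : PySem.Chars.isspace c = false) : (tokSpan (c :: cs)).2.length ≤ cs.length := by
  unfold tokSpan
  split
  · have h1 := tokSpan_rest_le (qSpan c cs).2
    have h2 := qSpan_rest_le c cs
    simpa using le_trans h1 h2
  · rw [if_neg (by simp [hs])]
    simpa using tokSpan_rest_le cs

-- the whitespace-separated quote-aware tokens of a string
def toks : List Char → List (List Char)
  | [] => []
  | c :: cs =>
    if PySem.Chars.isspace c then toks cs
    else (tokSpan (c :: cs)).1 :: toks (tokSpan (c :: cs)).2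
termination_by cs => cs.length
decreasing_by
  · simp only [List.length_cons]; omega
  · have := tokSpan_cons_rest_le c cs (by simp_all); simp only [List.length_cons]; omega

-- A's flush of `current` at end of input
def finA (st : List String × List Char × Bool × Option Char) : List String :=
  if st.2.1 = [] then st.1 else st.1 ++ [String.ofList st.2.1]

-- drop/take across a split l.drop j = a ++ b (used to relate index scans to spans)
theorem drop_add_of_append {α : Type} (l a b : List α) (j : Nat) (h : l.drop j = a ++ b) :
    l.drop (j + a.length) = b := by
  rw [← List.drop_drop, h]
  exact List.drop_left

theorem take_of_append {α : Type} (l a b : List α) (j : Nat) (h : l.drop j = a ++ b) :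
    (l.drop j).take a.length = a := by
  rw [h]; exact List.take_left

-- inside quotes, A copies characters until the matching quote, i.e. a qSpan
theorem foldA_quote (q : Char) : ∀ (cs : List Char) (parts : List String) (cur : List Char),
    finA (cs.foldl stepA (parts, cur, true, some q)) =
      finA ((qSpan q cs).2.foldl stepA (parts, cur ++ (qSpan q cs).1, false, none))
  | [], parts, cur => by simp [qSpan, finA]
  | c :: cs, parts, cur => by
    by_cases hc : c = q
    · subst hc
      have hstep : stepA (parts, cur, true, some c) c = (parts, cur ++ [c], false, none) := by
        simp [stepA]
      rw [List.foldl_cons, hstep]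
      simp [qSpan]
    · have hstep : stepA (parts, cur, true, some q) c = (parts, cur ++ [c], true, some q) := by
        simp [stepA, Ne.symm hc]
      rw [List.foldl_cons, hstep, foldA_quote q cs parts (cur ++ [c])]
      have hsp : qSpan q (c :: cs) = (c :: (qSpan q cs).1, (qSpan q cs).2) := by
        simp [qSpan, hc]
      rw [hsp]
      simp [List.append_assoc]

-- characterization of A's whole loop by the reference tokenizer
theorem foldA_toks : ∀ (cs : List Char) (parts : List String) (cur : List Char),
    finA (cs.foldl stepA (parts, cur, false, none)) =
      if cur = [] then parts ++ (toks cs).map String.ofList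
      else (parts ++ [String.ofList (cur ++ (tokSpan cs).1)]) ++ ((toks (tokSpan cs).2).map String.ofList)
  | [], parts, cur => by
    by_cases h : cur = [] <;> simp [h, finA, toks, tokSpan]
  | c :: cs, parts, cur => by
    by_cases hq : (c == '"' || c == '\'') = true
    · -- quote character: A enters in_quotes and copies a qSpan
      have hs : PySem.Chars.isspace c = false := by
        rcases Bool.or_eq_true_iff.mp hq with h | h <;>
          (rw [show c = _ from by exact_mod_cast eq_of_beq h]; decide)
      have hstep : stepA (parts, cur, false, none) c = (parts, cur ++ [c], true, some c) := by
        simp [stepA, hq]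
      have htok : tokSpan (c :: cs) =
          (c :: ((qSpan c cs).1 ++ (tokSpan (qSpan c cs).2).1), (tokSpan (qSpan c cs).2).2) := by
        conv_lhs => rw [tokSpan.eq_def]
        simp [hq]
      have htoks : toks (c :: cs) = (tokSpan (c :: cs)).1 :: toks (tokSpan (c :: cs)).2 := by
        conv_lhs => rw [toks.eq_def]
        simp [hs]
      rw [List.foldl_cons, hstep, foldA_quote c cs parts (cur ++ [c]),
        foldA_toks (qSpan c cs).2 parts (cur ++ [c] ++ (qSpan c cs).1),
        if_neg (by simp), htoks, htok]
      by_cases h : cur = [] <;> simp [h]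
    · by_cases hs : PySem.Chars.isspace c = true
      · -- whitespace outside quotes: A flushes current
        have htok : tokSpan (c :: cs) = ([], c :: cs) := by
          conv_lhs => rw [tokSpan.eq_def]
          simp [hq, hs]
        have htoks : toks (c :: cs) = toks cs := by
          conv_lhs => rw [toks.eq_def]
          simp [hs]
        by_cases h : cur = []
        · subst h
          have hstep : stepA (parts, [], false, none) c = (parts, [], false, none) := by
            simp [stepA, hq, hs]
          rw [List.foldl_cons, hstep, foldA_toks cs parts [], if_pos rfl, if_pos rfl, htoks]
        · have hstep : stepA (parts, cur, false, none) c =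
              (parts ++ [String.ofList cur], [], false, none) := by
            simp [stepA, hq, hs, h]
          rw [List.foldl_cons, hstep, foldA_toks cs (parts ++ [String.ofList cur]) [],
            if_pos rfl, if_neg h, htok, htoks]
          simp
      · -- ordinary character: appended to current
        have hstep : stepA (parts, cur, false, none) c = (parts, cur ++ [c], false, none) := by
          simp [stepA, hq, hs]
        have htok : tokSpan (c :: cs) = (c :: (tokSpan cs).1, (tokSpan cs).2) := by
          conv_lhs => rw [tokSpan.eq_def]
          simp [hq, hs]
        have htoks : toks (c :: cs) = (tokSpan (c :: cs)).1 :: toks (tokSpan (c :: cs)).2 := by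
          conv_lhs => rw [toks.eq_def]
          simp [hs]
        rw [List.foldl_cons, hstep, foldA_toks cs parts (cur ++ [c]), if_neg (by simp),
          htoks, htok]
        by_cases h : cur = [] <;> simp [h]
termination_by cs _ _ => cs.length
decreasing_by
  all_goals simp only [List.length_cons]
  all_goals first
    | omega
    | exact Nat.lt_succ_of_le (qSpan_rest_le _ _)

-- nonempty token at a non-space head
theorem tokSpan_fst_pos (c : Char) (cs : List Char) (hs : PySem.Chars.isspace c = false) :
    1 ≤ (tokSpan (c :: cs)).1.length := by
  rw [tokSpan.eq_def]
  by_cases hq : (c == '"' || c == '\'') = true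
  · simp [hq]
  · simp [hq, hs]

-- B's quote scan = qSpan, as an index computation (fuel never runs out)
theorem scanQuote_eq (cs : List Char) (q : Char) : ∀ (fuel j : Nat), cs.length ≤ j + fuel →
    scanQuote cs q fuel j = j + (qSpan q (cs.drop j)).1.length
  | 0, j, hf => by
    rw [scanQuote, List.drop_eq_nil_of_le (by omega)]
    simp [qSpan]
  | fuel + 1, j, hf => by
    rw [scanQuote]
    split
    · rename_i h
      rw [List.drop_eq_getElem_cons h, List.getD_eq_getElem cs ' ' h]
      by_cases hc : cs[j] == q
      · simp [qSpan, hc]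
      · rw [if_neg (by simp_all), scanQuote_eq cs q fuel (j + 1) (by omega)]
        simp only [qSpan, hc, Bool.false_eq_true, if_false]
        simp
        omega
    · rename_i h
      rw [List.drop_eq_nil_of_le (by omega)]
      simp [qSpan]

-- B's token scan = tokSpan, as an index computation
theorem scanTok_eq (cs : List Char) : ∀ (fuel j : Nat), cs.length ≤ j + fuel →
    scanTok cs fuel j = j + (tokSpan (cs.drop j)).1.length
  | 0, j, hf => by
    rw [scanTok, List.drop_eq_nil_of_le (by omega)]
    simp [tokSpan]
  | fuel + 1, j, hf => by
    rw [scanTok]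
    split
    · rename_i h
      rw [List.drop_eq_getElem_cons h, List.getD_eq_getElem cs ' ' h]
      by_cases hq : (cs[j] == '"' || cs[j] == '\'') = true
      · rw [if_pos hq]
        rw [scanQuote_eq cs cs[j] (cs.length + 1) (j + 1) (by omega)]
        have hdrop : cs.drop (j + 1 + (qSpan cs[j] (cs.drop (j + 1))).1.length) =
            (qSpan cs[j] (cs.drop (j + 1))).2 :=
          drop_add_of_append cs _ _ (j + 1) (qSpan_append _ _).symm
        rw [scanTok_eq cs fuel (j + 1 + (qSpan cs[j] (cs.drop (j + 1))).1.length) (by omega),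
          hdrop]
        conv_rhs => rw [tokSpan]
        rw [if_pos hq]
        simp
        omega
      · by_cases hs : PySem.Chars.isspace cs[j] = true
        · rw [if_neg (by simp_all), if_pos hs]
          conv_rhs => rw [tokSpan]
          rw [if_neg (by simp_all), if_pos hs]
          simp
        · rw [if_neg (by simp_all), if_neg (by simp_all)]
          rw [scanTok_eq cs fuel (j + 1) (by omega)]
          conv_rhs => rw [tokSpan]
          rw [if_neg (by simp_all), if_neg (by simp_all)]
          simp
          omega
    · rename_i h
      rw [List.drop_eq_nil_of_le (by omega)]
      simp [tokSpan]

-- B's outer loop = token list of the suffix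
theorem loopB_eq (cs : List Char) : ∀ (fuel i : Nat) (parts : List String),
    cs.length ≤ i + fuel →
    loopB cs fuel i parts = parts ++ ((toks (cs.drop i)).map String.ofList)
  | 0, i, parts, hf => by
    rw [loopB, List.drop_eq_nil_of_le (by omega)]
    simp [toks]
  | fuel + 1, i, parts, hf => by
    rw [loopB]
    split
    · rename_i h
      by_cases hs : PySem.Chars.isspace (cs.getD i ' ') = true
      · rw [if_pos hs, loopB_eq cs fuel (i + 1) parts (by omega)]
        conv_rhs => rw [List.drop_eq_getElem_cons h, toks]
        rw [List.getD_eq_getElem cs ' ' h] at hs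
        rw [if_pos hs]
      · rw [if_neg hs]
        show loopB cs fuel (scanTok cs (cs.length + 1) i)
            (parts ++ [String.ofList (PySem.List.slice cs (some (i : Int))
              (some ((scanTok cs (cs.length + 1) i : Nat) : Int)))]) =
          parts ++ List.map String.ofList (toks (List.drop i cs))
        have hs' : PySem.Chars.isspace (cs.getD i ' ') = false := by
          simp only [Bool.not_eq_true] at hs; exact hs
        have hst := scanTok_eq cs (cs.length + 1) i (by omega)
        have hTR := tokSpan_append (cs.drop i)
        have hpos : 1 ≤ (tokSpan (cs.drop i)).1.length := by
          rw [List.drop_eq_getElem_cons h]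
          exact tokSpan_fst_pos _ _ (by rw [List.getD_eq_getElem cs ' ' h] at hs'; exact hs')
        have hslice : PySem.List.slice cs (some (i : Int))
            (some ((scanTok cs (cs.length + 1) i : Nat) : Int)) = (tokSpan (cs.drop i)).1 := by
          rw [PySem.List.slice_natCast, hst, Nat.add_sub_cancel_left]
          exact take_of_append cs _ _ i hTR.symm
        have hdrop : cs.drop (scanTok cs (cs.length + 1) i) = (tokSpan (cs.drop i)).2 := by
          rw [hst]
          exact drop_add_of_append cs _ _ i hTR.symm
        rw [hslice, loopB_eq cs fuel (scanTok cs (cs.length + 1) i)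
          (parts ++ [String.ofList (tokSpan (cs.drop i)).1]) (by omega), hdrop]
        conv_rhs => rw [List.drop_eq_getElem_cons h, toks]
        rw [List.getD_eq_getElem cs ' ' h] at hs
        rw [if_neg hs, ← List.drop_eq_getElem_cons h]
        simp
    · rename_i h
      rw [List.drop_eq_nil_of_le (by omega)]
      simp [toks]

-- the two parts lists coincide on every input
theorem parts_eq (cs : List Char) :
    loopB cs (cs.length + 1) 0 [] =
      (if (cs.foldl stepA (([], [], false, none) :
            List String × List Char × Bool × Option Char)).2.1 = []
       then (cs.foldl stepA (([], [], false, none) :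
            List String × List Char × Bool × Option Char)).1
       else (cs.foldl stepA (([], [], false, none) :
            List String × List Char × Bool × Option Char)).1 ++
          [String.ofList (cs.foldl stepA (([], [], false, none) :
            List String × List Char × Bool × Option Char)).2.1]) := by
  have hA := foldA_toks cs [] []
  rw [if_pos rfl] at hA
  simp only [List.nil_append] at hA
  rw [loopB_eq cs (cs.length + 1) 0 [] (by omega)]
  simp only [List.drop_zero, List.nil_append]
  rw [← hA]
  rfl

-- A unpacks `s, p, o = parts`; B indexes `parts[0], parts[1], parts[2]` behind the length check
theorem extract_eq (ps : List String) :
    (match ps with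
     | [s, p, o] => (s, p, o)
     | _ => (("" : String), ("" : String), ("" : String))) =
      (if ps.length == 3 then (ps.getD 0 "", ps.getD 1 "", ps.getD 2 "") else ("", "", "")) := by
  match ps with
  | [] => rfl
  | [_] => rfl
  | [_, _] => rfl
  | [_, _, _] => rfl
  | _ :: _ :: _ :: _ :: _ => simp

-- ===== VERDICT (by name: the statement is the Claim_ definition above) =====
theorem parse_triple_spec : Claim_equal_parse_triple := by
  intro s _ _
  unfold Spec_parse_triple parse_triple parse_triple_alt
  simp only [← parts_eq, extract_eq]
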